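-- pv_equiv track=rewrite | github.com/Alferdize/Data-Structure-and-Algorithms | Algorithms/binary_search.com/array_min_replacement.py | solve
-- ===== SOURCE A (Python) =====
-- def solve(nums):
--     # Write your code here
--     small = nums[0]
--     temp = 0
--     for i in range(len(nums)):
--         temp = nums[i]
--         nums[i] = small
--         if small > temp:
--             small =temp
--     nums[0] = 0
--     return nums
-- ===== SOURCE B (Python) =====
-- def solve(nums):
--     # Divide-and-conquer prefix-minimum: recurse on halves, merge by mapping the
--     # left half's final minimum over the right half's table; then prepend 0 and
--     # drop the last entry. (Return value only; does not mutate nums.)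
--     def pmin(a):
--         if len(a) <= 1:
--             return list(a)
--         k = len(a) // 2
--         left = pmin(a[:k])
--         right = pmin(a[k:])
--         m = left[-1]
--         return left + [min(m, x) for x in right]
--     return [0] + pmin(nums)[:-1]
-- ===== Notes on version B (the rewrite author's own statement) =====
-- stated objective: alternative
-- what changed: A does one interleaved in-place pass tracking a running minimum while shift-writing; B computes the prefix-minimum table by divide-and-conquer recursion on halves (merging by mapping the left half's last minimum over the right half's table) and then assembles [0] + table[:-1] as a new list (return value only: A mutates its argument, B does not).
-- outside the precondition, e.g. on solve([]): A raises IndexError, B returns [0]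
import Mathlib
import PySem

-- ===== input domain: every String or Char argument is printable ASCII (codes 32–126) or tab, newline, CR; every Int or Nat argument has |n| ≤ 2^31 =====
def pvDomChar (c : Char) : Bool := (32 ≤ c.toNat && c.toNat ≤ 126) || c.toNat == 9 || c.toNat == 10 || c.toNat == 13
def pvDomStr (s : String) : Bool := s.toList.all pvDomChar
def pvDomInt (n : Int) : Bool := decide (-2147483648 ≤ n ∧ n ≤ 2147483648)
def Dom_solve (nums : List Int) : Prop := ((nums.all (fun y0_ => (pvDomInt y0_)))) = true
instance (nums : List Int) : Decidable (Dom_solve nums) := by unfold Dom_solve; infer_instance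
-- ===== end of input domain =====

-- B computes the prefix-minimum table by divide-and-conquer recursion on halves and then
-- assembles a leading zero plus the table without its last entry as a new list, instead of
-- A's single interleaved in-place pass; equivalence is about the RETURN value only
-- (Python A mutates its argument, B does not).


-- ===== PORT A =====
-- A's loop `for i in range(len(nums))` reads nums[i] before overwriting it, so it is the
-- obvious structural recursion over the list carrying the running `small` and producing
-- the written cells; the final `nums[0] = 0` is the trailing `.set 0 0`.
def solveLoopA (small : Int) : List Int → List Int × Int
  | [] => ([], small)
  | temp :: rest =>
      -- nums[i] = small; if small > temp: small = temp
      let small' := if small > temp then temp else small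
      let r := solveLoopA small' rest
      (small :: r.1, r.2)

def solve (nums : List Int) : List Int :=
  match nums with
  | [] => []   -- Python A raises IndexError at `nums[0]`; excluded by Pre_solve
  | h :: _ =>
      -- small = nums[0]; the loop; nums[0] = 0; return nums
      ((solveLoopA h nums).1).set 0 0

-- ===== PORT B =====
-- pmin: divide-and-conquer prefix minimum; a[:k]/a[k:] with 0 ≤ k ≤ len are take/drop,
-- and left[-1] (left is nonempty here since k ≥ 1) is getLastD 0.
def pmin (a : List Int) : List Int :=
  if a.length ≤ 1 then a
  else
    let k := a.length / 2
    let left := pmin (a.take k)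
    let right := pmin (a.drop k)
    left ++ right.map (fun x => min (left.getLastD 0) x)
termination_by a.length
decreasing_by
  · simp only [List.length_take]; omega
  · simp only [List.length_drop]; omega

def solve_alt (nums : List Int) : List Int :=
  -- return [0] + pmin(nums)[:-1]
  0 :: (pmin nums).dropLast

-- ===== PRECONDITION & SPEC =====
-- Pre_ excludes only the empty list, on which Python A raises IndexError.
def Pre_solve (nums : List Int) : Prop := nums ≠ []
instance (nums : List Int) : Decidable (Pre_solve nums) := by unfold Pre_solve; infer_instance
def pvWitness_solve : List Int := ([3, 1, 2, 0, 5])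

def Spec_solve (nums : List Int) (out : List Int) : Prop := out = solve_alt nums
instance (nums : List Int) (out : List Int) : Decidable (Spec_solve nums out) := by unfold Spec_solve; infer_instance

-- ===== CLAIM (what is proved, stated in full; the proofs are below) =====
def Claim_equal_solve : Prop := ∀ (nums : List Int), Dom_solve nums → Pre_solve nums → Spec_solve nums (solve nums)

-- ===== LEMMAS AND PROOFS =====

-- the running-minimum sequence, used only by the proofs
def accMin (s : Int) : List Int → List Int
  | [] => []
  | a :: r => min s a :: accMin (min s a) r

-- the prefix-minimum table of a list
def pmList : List Int → List Int
  | [] => []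
  | h :: t => h :: accMin h t

theorem accMin_append (s : Int) (l r : List Int) :
    accMin s (l ++ r) = accMin s l ++ accMin ((accMin s l).getLastD s) r := by
  induction l generalizing s with
  | nil => simp [accMin]
  | cons a l' ih =>
      simp only [List.cons_append, accMin, List.getLastD_cons, ih (min s a)]

theorem map_min_accMin (m s : Int) (r : List Int) :
    (accMin s r).map (fun x => min m x) = accMin (min m s) r := by
  induction r generalizing s with
  | nil => simp [accMin]
  | cons a r' ih =>
      simp only [accMin, List.map_cons, ih (min s a)]
      rw [min_assoc]

theorem pmList_append (l r : List Int) (hl : l ≠ []) :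
    pmList (l ++ r) =
      pmList l ++ (pmList r).map (fun x => min ((pmList l).getLastD 0) x) := by
  cases l with
  | nil => exact absurd rfl hl
  | cons h t =>
      cases r with
      | nil => simp [pmList]
      | cons r0 r' =>
          simp only [pmList, List.cons_append, accMin_append, List.getLastD_cons,
            List.map_cons, List.cons_append, accMin]
          rw [map_min_accMin, min_comm]

theorem pmin_eq (a : List Int) : pmin a = pmList a := by
  induction a using pmin.induct with
  | case1 a h =>
      rw [pmin, if_pos h]
      match a, h with
      | [], _ => rfl
      | [x], _ => simp [pmList, accMin]
  | case2 a h k ihl ihr =>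
      rw [pmin, if_neg h]
      simp only []
      rw [ihl, ihr, ← pmList_append _ _ (by
        intro hnil
        have hk : k = a.length / 2 := rfl
        have hlen : (List.take k a).length = 0 := by rw [hnil]; rfl
        rw [List.length_take] at hlen
        omega)]
      simp

theorem solveLoopA_fst (t : List Int) : ∀ s : Int,
    (solveLoopA s t).1 = (s :: accMin s t).dropLast := by
  induction t with
  | nil => intro s; rfl
  | cons a r ih =>
      intro s
      have hmin : (if s > a then a else s) = min s a := by
        split_ifs with h <;> omega
      simp only [solveLoopA, accMin, hmin, List.dropLast_cons₂]
      exact congrArg _ (ih (min s a))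

theorem solve_eq_alt (h : Int) (t : List Int) : solve (h :: t) = solve_alt (h :: t) := by
  simp only [solve, solve_alt, solveLoopA, pmin_eq, pmList]
  have hh : (if h > h then h else h) = h := by omega
  rw [hh, solveLoopA_fst t h]
  cases t with
  | nil => rfl
  | cons a r => simp [accMin, List.dropLast_cons₂]

-- ===== VERDICT (by name: the statement is the Claim_ definition above) =====
theorem solve_spec : Claim_equal_solve := by
  intro nums _ hpre
  unfold Spec_solve
  cases nums with
  | nil => exact absurd rfl hpre
  | cons h t => exact (solve_eq_alt h t)
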